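-- pv_equiv track=rewrite | github.com/ekdms342/Coding_test_PL | 프로그래머스/lv1/76501. 음양 더하기/음양 더하기.py | solution
-- ===== SOURCE A (Python) =====
-- def solution(absolutes, signs):
--     answer = 0
--     for i in range(0,len(signs),1):
--         if signs[i] == True:
--             answer += absolutes[i]
--         else :
--             answer -= absolutes[i]
--     return answer
-- ===== SOURCE B (Python) =====
-- def solution(absolutes, signs):
--     pairs = list(zip(absolutes, signs))
--     total = sum(a for a, _ in pairs)
--     neg = sum(a for a, s in pairs if not s)
--     return total - 2 * neg
-- ===== Notes on version B (the rewrite author's own statement) =====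
-- stated objective: alternative
-- what changed: Replaced the per-element branching accumulate loop over indices with two separate aggregates over zipped pairs (grand total and negative-only total) combined arithmetically as total - 2*neg.
import Mathlib
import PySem

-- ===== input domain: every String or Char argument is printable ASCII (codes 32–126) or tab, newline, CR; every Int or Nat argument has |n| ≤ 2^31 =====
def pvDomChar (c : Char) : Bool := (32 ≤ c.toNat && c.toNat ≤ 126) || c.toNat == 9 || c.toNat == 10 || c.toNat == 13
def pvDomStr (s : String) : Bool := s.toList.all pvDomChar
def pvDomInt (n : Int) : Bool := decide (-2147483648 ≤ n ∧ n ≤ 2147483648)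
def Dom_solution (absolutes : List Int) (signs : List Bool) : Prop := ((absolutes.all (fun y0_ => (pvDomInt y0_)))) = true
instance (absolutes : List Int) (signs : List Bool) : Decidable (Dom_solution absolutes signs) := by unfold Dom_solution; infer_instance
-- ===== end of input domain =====

-- B replaces A's branching accumulate loop by two aggregates over zipped pairs, combined as total - 2*neg (alternative decomposition, same cost).

-- ===== PORT A =====
def solution (absolutes : List Int) (signs : List Bool) : Int :=
  (PySem.List.pyRange 0 signs.length 1).foldl
    (fun answer i =>
      if PySem.List.pyGetD signs i false == true then
        answer + PySem.List.pyGetD absolutes i 0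
      else
        answer - PySem.List.pyGetD absolutes i 0) 0

-- ===== PORT B =====
def solution_alt (absolutes : List Int) (signs : List Bool) : Int :=
  let pairs := absolutes.zip signs
  let total := (pairs.map (fun p => p.1)).sum
  let neg := ((pairs.filter (fun p => !p.2)).map (fun p => p.1)).sum
  total - 2 * neg

-- ===== PRECONDITION & SPEC =====
-- A indexes absolutes[i] for every i < len(signs): it raises IndexError when signs is longer than absolutes.
def Pre_solution (absolutes : List Int) (signs : List Bool) : Prop :=
  signs.length ≤ absolutes.length
instance (absolutes : List Int) (signs : List Bool) : Decidable (Pre_solution absolutes signs) := by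
  unfold Pre_solution; infer_instance
def pvWitness_solution : List Int × List Bool := ([4, 7, 12], [true, false, true])

def Spec_solution (absolutes : List Int) (signs : List Bool) (out : Int) : Prop := out = solution_alt absolutes signs
instance (absolutes : List Int) (signs : List Bool) (out : Int) : Decidable (Spec_solution absolutes signs out) := by unfold Spec_solution; infer_instance

-- ===== CLAIM (what is proved, stated in full; the proofs are below) =====
def Claim_equal_solution : Prop := ∀ (absolutes : List Int) (signs : List Bool), Dom_solution absolutes signs → Pre_solution absolutes signs → Spec_solution absolutes signs (solution absolutes signs)

-- ===== LEMMAS AND PROOFS =====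

-- the common signed-sum value over the zipped pairs
def pvSigned (l : List (Int × Bool)) : Int :=
  (l.map (fun p => if p.2 then p.1 else -p.1)).sum

lemma b_eq_signed (l : List (Int × Bool)) :
    (l.map (fun p => p.1)).sum - 2 * ((l.filter (fun p => !p.2)).map (fun p => p.1)).sum
      = pvSigned l := by
  induction l with
  | nil => simp [pvSigned]
  | cons p t ih =>
    rcases p with ⟨a, s⟩
    cases s <;> simp [pvSigned, List.filter, List.sum_cons] at * <;> omega

lemma range_sum_eq_signed : ∀ (signs : List Bool) (absolutes : List Int),
    signs.length ≤ absolutes.length →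
    ((List.range signs.length).map
      (fun k => if signs.getD k false then absolutes.getD k 0 else -(absolutes.getD k 0))).sum
      = pvSigned (absolutes.zip signs) := by
  intro signs
  induction signs with
  | nil => intro abs _; simp [pvSigned]
  | cons s t ih =>
    intro abs h
    cases abs with
    | nil => simp at h
    | cons a abs' =>
      simp only [List.length_cons, List.range_succ_eq_map, List.map_cons, List.map_map,
        List.sum_cons, List.zip_cons_cons, Function.comp_def,
        List.getD_cons_succ, List.getD_cons_zero]
      rw [ih abs' (by simpa using h)]
      simp [pvSigned]

theorem solution_spec : Claim_equal_solution := by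
  intro absolutes signs _ hpre
  unfold Spec_solution solution solution_alt
  have hbody : (PySem.List.pyRange 0 signs.length 1).foldl
      (fun answer i =>
        if PySem.List.pyGetD signs i false == true then
          answer + PySem.List.pyGetD absolutes i 0
        else
          answer - PySem.List.pyGetD absolutes i 0) 0
      = (PySem.List.pyRange 0 signs.length 1).foldl
        (fun answer i => answer +
          (if PySem.List.pyGetD signs i false then PySem.List.pyGetD absolutes i 0
           else -(PySem.List.pyGetD absolutes i 0))) 0 := by
    apply PySem.List.foldl_congr_mem
    intro acc i _
    by_cases h : PySem.List.pyGetD signs i false <;> simp [h, sub_eq_add_neg]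
  rw [hbody, PySem.List.foldl_add, PySem.List.pyRange_one]
  simp only [Int.sub_zero, Int.toNat_natCast, List.map_map, Function.comp_def,
    PySem.List.pyGetD_natCast, Int.zero_add]
  rw [range_sum_eq_signed signs absolutes hpre, ← b_eq_signed]
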